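/- WRITTEN in the form farm/mkstatement.py generates (unit `__asan_loadN_noabort`; the twin of `asan_storeN_noabort.lean`; first stated
   by lodepng as a local unit, whose `readChunk_iCCP` copies a 40-byte struct through `__asan_loadN_noabort`) — do not edit.
   THE STATEMENT of the proof unit `__asan_loadN_noabort`: the function `__asan_loadN_noabort` (19 instructions) satisfies its contract,
   given the contracts of its callees. What the names mean: ProgX/Base/Spec/Basic.lean. The theorem to prove:
   `theorem asan_loadN_noabort_ok : ProgX.Base.Spec.asan_loadN_noabort.Statement`. -/
import ProgX.Base.Spec.Runtime
namespace ProgX.Base.Spec.asan_loadN_noabort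
open X86 X86.User Asan

/-- The statement of unit `__asan_loadN_noabort`. -/
def Statement : Prop :=
  ∀ (Lay : Layout) (_hLay : Lay.hi = 0x1000000) (μ : Microarch) (_hμ : UserX.MicroOK μ) (u₀ : State)
    (_hcode : HasCodeNat Lay u₀ ProgX.Base.L.__asan_loadN_noabort.entry ProgX.Base.Code.code___asan_loadN_noabort.nat ProgX.Base.L.__asan_loadN_noabort.size)
    (_h_range_bad : Calls Lay μ ProgX.Base.WayInv (ProgX.Base.conv u₀) ProgX.Base.L.range_bad.entry Asan.rangeBadSpec),
    Calls Lay μ ProgX.Base.WayInv (ProgX.Base.conv u₀) ProgX.Base.L.__asan_loadN_noabort.entry Asan.checkNSpec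

end ProgX.Base.Spec.asan_loadN_noabort
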